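-- pv_equiv track=rewrite | github.com/nbryn/privugger | experiments.py | naive_k_anonymity
-- ===== SOURCE A (Python) =====
-- def naive_k_anonymity(ages):
--     k = 2
--     if len(ages) == 0:
--         return ages
--
--     num_attrs = len(ages[0])
--     num_records = len(ages)
--     for i in range(num_attrs):
--         target_attr = num_attrs - 1 - i
--         if not target_attr == num_attrs:
--             for j in range(num_records):
--                 ages[j][target_attr] = -1
--
--         for i in range(num_records):
--             k_prime = 0
--             for j in range(num_records):
--                 if ages[i] == ages[j]:
--                     k_prime = k_prime + 1
--
--             if k_prime < k:
--                 break
--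
--         if not k_prime < k:
--             return ages
--
--     return ages
-- ===== SOURCE B (Python) =====
-- def naive_k_anonymity(ages):
--     # Binary-search the minimal number m of rightmost columns to suppress
--     # (k-anonymity is monotone in m), then mutate the rows in place once.
--     if len(ages) == 0:
--         return ages
--     n = len(ages[0])
--     if n == 0:
--         return ages
--
--     def anonymous(m):
--         counts = {}
--         for row in ages:
--             key = tuple(row[:n - m]) + (-1,) * m + tuple(row[n:])
--             counts[key] = counts.get(key, 0) + 1
--         return all(c >= 2 for c in counts.values())
--
--     lo, hi = 1, n
--     while lo < hi:
--         mid = (lo + hi) // 2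
--         if anonymous(mid):
--             hi = mid
--         else:
--             lo = mid + 1
--     for row in ages:
--         row[n - lo:n] = [-1] * lo
--     return ages
-- ===== Notes on version B (the rewrite author's own statement) =====
-- stated objective: faster
-- what changed: A linearly tries suppressing one more rightmost column at a time and re-checks 2-anonymity with a quadratic all-pairs row-equality count; B exploits that 2-anonymity is monotone in the number of suppressed columns and binary-searches the minimal suppression level, checking each level in one pass with a counting dict, then blanks the columns once.
import Mathlib
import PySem

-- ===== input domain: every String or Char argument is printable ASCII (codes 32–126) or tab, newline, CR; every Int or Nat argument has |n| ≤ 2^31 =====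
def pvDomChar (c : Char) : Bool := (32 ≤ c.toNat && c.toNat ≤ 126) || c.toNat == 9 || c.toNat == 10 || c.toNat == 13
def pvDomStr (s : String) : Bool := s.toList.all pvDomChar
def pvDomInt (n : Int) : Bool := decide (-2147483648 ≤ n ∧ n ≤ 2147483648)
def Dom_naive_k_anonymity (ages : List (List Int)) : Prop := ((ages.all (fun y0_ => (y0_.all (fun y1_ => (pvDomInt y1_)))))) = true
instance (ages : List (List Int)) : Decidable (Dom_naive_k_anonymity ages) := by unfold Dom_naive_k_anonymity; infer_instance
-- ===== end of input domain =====

-- B replaces A's linear scan with quadratic per-step k-anonymity checks by a binary search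
-- over the number of suppressed columns with a counter-dict check (faster); both A and B
-- mutate the argument list in place in Python — the equivalence proved here is about the
-- RETURN value only.

-- ===== PORT A =====

-- the inner double loop: for i in range(num_records): k_prime = count of ages[i]; break if < 2;
-- returns the final value of k_prime
def pvALoop (all : List (List Int)) (kp : Int) : List (List Int) → Int
  | [] => kp
  | r :: rest =>
      let kp' : Int := (PySem.List.count all r : Int)
      if kp' < 2 then kp' else pvALoop all kp' rest

-- the outer 'for i in range(num_attrs)' loop, with the current (mutated) rows as state
def pvAOuter (n : Nat) (i : Nat) (rows : List (List Int)) : List (List Int) :=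
  if i < n then
    let t := n - 1 - i
    let rows' := if t = n then rows else rows.map (fun r => r.set t (-1))
    if pvALoop rows' 0 rows' < 2 then pvAOuter n (i + 1) rows' else rows'
  else rows
termination_by n - i

def naive_k_anonymity (ages : List (List Int)) : List (List Int) :=
  if ages.length = 0 then ages
  else pvAOuter (ages.headD []).length 0 ages

-- ===== PORT B =====

-- Source B's 'anonymous(m)': counter dict over the rows with the last m of the first n columns
-- replaced by -1, then all counts ≥ 2
def pvAnon (ages : List (List Int)) (n m : Nat) : Bool :=
  let counts : PySem.Dict (List Int) Int := ages.foldl (fun d row =>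
      let key := row.take (n - m) ++ List.replicate m (-1) ++ row.drop n
      d.insert key (d.getD key 0 + 1)) PySem.Dict.empty
  counts.values.all (fun c => decide (2 ≤ c))

-- Source B's 'while lo < hi' binary search
def pvBS (p : Nat → Bool) (lo hi : Nat) : Nat :=
  if lo < hi then
    let mid := (lo + hi) / 2
    if p mid then pvBS p lo mid else pvBS p (mid + 1) hi
  else lo
termination_by hi - lo

def naive_k_anonymity_alt (ages : List (List Int)) : List (List Int) :=
  if ages.length = 0 then ages
  else
    let n := (ages.headD []).length
    if n = 0 then ages
    else
      let lo := pvBS (fun m => pvAnon ages n m) 1 n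
      ages.map (fun row => row.take (n - lo) ++ List.replicate lo (-1) ++ row.drop n)

-- ===== PRECONDITION & SPEC =====
-- Pre_ excludes exactly the inputs where A raises IndexError: some row shorter than the first row.
def Pre_naive_k_anonymity (ages : List (List Int)) : Prop :=
  ∀ r ∈ ages, (ages.headD []).length ≤ r.length
instance (ages : List (List Int)) : Decidable (Pre_naive_k_anonymity ages) := by
  unfold Pre_naive_k_anonymity; infer_instance
def pvWitness_naive_k_anonymity : List (List Int) := [[1, 2], [1, 3]]

def Spec_naive_k_anonymity (ages : List (List Int)) (out : List (List Int)) : Prop := out = naive_k_anonymity_alt ages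
instance (ages : List (List Int)) (out : List (List Int)) : Decidable (Spec_naive_k_anonymity ages out) := by unfold Spec_naive_k_anonymity; infer_instance

-- ===== CLAIM (what is proved, stated in full; the proofs are below) =====
def Claim_equal_naive_k_anonymity : Prop := ∀ (ages : List (List Int)), Dom_naive_k_anonymity ages → Pre_naive_k_anonymity ages → Spec_naive_k_anonymity ages (naive_k_anonymity ages)

-- ===== LEMMAS AND PROOFS =====

-- suppressing the last m of the first n columns, as a function of the original row
def pvBlank (n m : Nat) (row : List Int) : List Int :=
  row.take (n - m) ++ List.replicate m (-1) ++ row.drop n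

-- the k-anonymity property of a list of (blanked) rows
def pvKAnon (rows : List (List Int)) : Prop :=
  ∀ r ∈ rows, 2 ≤ rows.count r


-- linear first index in [lo, hi) satisfying p, else hi
def pvFirstGE (p : Nat → Bool) (lo hi : Nat) : Nat :=
  if lo < hi then (if p lo then lo else pvFirstGE p (lo + 1) hi) else hi
termination_by hi - lo

theorem pvBlank_zero (n : Nat) (row : List Int) : pvBlank n 0 row = row := by
  simp [pvBlank]

theorem pvBlank_set (n i : Nat) (row : List Int) (hi : i < n) (hlen : n ≤ row.length) :
    (pvBlank n i row).set (n - 1 - i) (-1) = pvBlank n (i + 1) row := by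
  have hidx : n - 1 - i < (pvBlank n i row).length := by
    simp [pvBlank]; omega
  rw [List.set_eq_take_append_cons_drop, if_pos hidx]
  unfold pvBlank
  rw [List.take_append, List.take_append, List.take_take]
  rw [List.drop_append, List.drop_append]
  have h1 : min (n - 1 - i) (n - i) = n - 1 - i := by omega
  have h2 : n - 1 - i - (row.take (n - i)).length = 0 := by
    simp [List.length_take]; omega
  have h3 : n - 1 - i + 1 - (row.take (n - i)).length = 0 := by
    simp [List.length_take]; omega
  have h4 : List.drop (n - 1 - i + 1) (row.take (n - i)) = [] := by
    apply List.drop_eq_nil_of_le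
    simp [List.length_take]; omega
  have h5 : n - (i + 1) = n - 1 - i := by omega
  rw [h1, h2, h3, h4, h5]
  have e1 : n - 1 - i - (min (n - i) row.length + i) = 0 := by omega
  have e2 : n + (n - 1 - i + 1 - (min (n - i) row.length + i)) = n := by omega
  simp [List.replicate_succ, e1, e2]

theorem pvALoop_lt_iff (all : List (List Int)) (kp : Int) (rows : List (List Int)) :
    pvALoop all kp rows < 2 ↔
      (∃ r ∈ rows, (PySem.List.count all r : Int) < 2) ∨ (rows = [] ∧ kp < 2) := by
  induction rows generalizing kp with
  | nil => simp [pvALoop]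
  | cons r rest ih =>
    simp only [pvALoop]
    by_cases h : ((PySem.List.count all r : Int) < 2)
    · rw [if_pos h]
      constructor
      · intro _; exact Or.inl ⟨r, by simp, h⟩
      · intro _; exact h
    · rw [if_neg h, ih]
      constructor
      · rintro (⟨r', hr', hlt⟩ | ⟨hrest, hkp⟩)
        · exact Or.inl ⟨r', List.mem_cons_of_mem _ hr', hlt⟩
        · exact absurd hkp h
      · rintro (⟨r', hr', hlt⟩ | ⟨habs, -⟩)
        · rcases List.mem_cons.mp hr' with rfl | hmem
          · exact absurd hlt h
          · exact Or.inl ⟨r', hmem, hlt⟩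
        · cases habs

theorem pvALoop_self (rows : List (List Int)) (hne : rows ≠ []) :
    (pvALoop rows 0 rows < 2) ↔ ¬ pvKAnon rows := by
  rw [pvALoop_lt_iff]
  unfold pvKAnon
  constructor
  · rintro (⟨r, hr, hlt⟩ | ⟨habs, -⟩)
    · intro hall
      have := hall r hr
      rw [PySem.List.count_eq] at hlt
      omega
    · exact absurd habs hne
  · intro h
    simp only [not_forall, not_le] at h
    obtain ⟨r, hr, hlt⟩ := h
    refine Or.inl ⟨r, hr, ?_⟩
    rw [PySem.List.count_eq]
    omega

theorem pvAnon_iff (ages : List (List Int)) (n m : Nat) :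
    pvAnon ages n m = true ↔ pvKAnon (ages.map (pvBlank n m)) := by
  have hfold : (ages.foldl (fun d row =>
      d.insert (row.take (n - m) ++ List.replicate m (-1) ++ row.drop n)
        (d.getD (row.take (n - m) ++ List.replicate m (-1) ++ row.drop n) 0 + 1))
      (PySem.Dict.empty : PySem.Dict (List Int) Int))
      = PySem.Dict.counter (ages.map (pvBlank n m)) := by
    rw [← PySem.Dict.foldl_insert_getD_add_one_eq_counter, List.foldl_map]
    rfl
  show (((ages.foldl (fun d row =>
      d.insert (row.take (n - m) ++ List.replicate m (-1) ++ row.drop n)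
        (d.getD (row.take (n - m) ++ List.replicate m (-1) ++ row.drop n) 0 + 1))
      (PySem.Dict.empty : PySem.Dict (List Int) Int))).values.all (fun c => decide (2 ≤ c))) = true ↔ _
  rw [hfold]
  have hvals : (PySem.Dict.counter (ages.map (pvBlank n m))).values
      = (PySem.Set.ofList (ages.map (pvBlank n m))).map
          (fun k => ((ages.map (pvBlank n m)).count k : Int)) := by
    show ((PySem.Dict.counter (ages.map (pvBlank n m))).items.map (·.2)) = _
    rw [PySem.Dict.items_counter, List.map_map]
    rfl
  rw [hvals]
  unfold pvKAnon
  simp only [List.all_eq_true, List.mem_map, PySem.Set.mem_ofList]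
  constructor
  · intro h r hr
    have := h _ ⟨r, hr, rfl⟩
    simp at this
    omega
  · rintro h c ⟨r, hr, rfl⟩
    have := h r hr
    simp
    omega

theorem count_map_ge {α : Type} [BEq α] [LawfulBEq α] (L : List α) (g : α → α) (x : α) :
    L.count x ≤ (L.map g).count (g x) := by
  rw [List.count_eq_countP, List.count_eq_countP, List.countP_map]
  apply List.countP_mono_left
  intro y _ h
  have : y = x := eq_of_beq h
  subst this
  simp [Function.comp]

theorem pvKAnon_mono (ages : List (List Int)) (n i : Nat) (hi : i < n)
    (hpre : ∀ r ∈ ages, n ≤ r.length) :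
    pvKAnon (ages.map (pvBlank n i)) → pvKAnon (ages.map (pvBlank n (i + 1))) := by
  have hstep : ages.map (pvBlank n (i + 1))
      = (ages.map (pvBlank n i)).map (fun r => r.set (n - 1 - i) (-1)) := by
    rw [List.map_map]
    apply List.map_congr_left
    intro r hr
    exact (pvBlank_set n i r hi (hpre r hr)).symm
  intro h r' hr'
  rw [hstep] at hr' ⊢
  obtain ⟨x, hx, rfl⟩ := List.mem_map.mp hr'
  have h1 := h x hx
  have h2 := count_map_ge (ages.map (pvBlank n i)) (fun r => r.set (n - 1 - i) (-1)) x
  omega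

theorem pvAOuter_spec (ages : List (List Int)) (n : Nat) (hne : ages ≠ [])
    (hpre : ∀ r ∈ ages, n ≤ r.length) :
    ∀ (k i : Nat), n - i ≤ k → i < n →
      pvAOuter n i (ages.map (pvBlank n i)) =
        ages.map (pvBlank n (pvFirstGE (fun m => pvAnon ages n m) (i + 1) n)) := by
  intro k
  induction k with
  | zero => intro i hk hi; omega
  | succ k ih =>
    intro i hk hi
    rw [pvAOuter]
    simp only [if_pos hi]
    have ht : ¬(n - 1 - i = n) := by omega
    rw [if_neg ht]
    have hrows' : (ages.map (pvBlank n i)).map (fun r => r.set (n - 1 - i) (-1))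
        = ages.map (pvBlank n (i + 1)) := by
      rw [List.map_map]
      apply List.map_congr_left
      intro r hr
      exact pvBlank_set n i r hi (hpre r hr)
    rw [hrows']
    have hne' : ages.map (pvBlank n (i + 1)) ≠ [] := by
      simp [hne]
    by_cases hP : pvKAnon (ages.map (pvBlank n (i + 1)))
    · have hnl : ¬(pvALoop (ages.map (pvBlank n (i + 1))) 0 (ages.map (pvBlank n (i + 1))) < 2) := by
        rw [pvALoop_self _ hne']; simpa using hP
      rw [if_neg hnl]
      by_cases h2 : i + 1 < n
      · rw [pvFirstGE]
        rw [if_pos h2, if_pos ((pvAnon_iff ages n (i + 1)).mpr hP)]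
      · have : i + 1 = n := by omega
        rw [pvFirstGE, if_neg h2, this]
    · have hnl : pvALoop (ages.map (pvBlank n (i + 1))) 0 (ages.map (pvBlank n (i + 1))) < 2 := by
        rw [pvALoop_self _ hne']; simpa using hP
      rw [if_pos hnl]
      by_cases h2 : i + 1 < n
      · rw [ih (i + 1) (by omega) h2]
        have hfa : pvAnon ages n (i + 1) = false := by
          rw [Bool.eq_false_iff]
          intro hc
          exact hP ((pvAnon_iff ages n (i + 1)).mp hc)
        conv_rhs => rw [pvFirstGE]
        rw [if_pos h2, hfa]
        simp
      · have hin : i + 1 = n := by omega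
        rw [pvAOuter]
        rw [if_neg (by omega : ¬(i + 1 < n))]
        rw [pvFirstGE, if_neg h2, hin]

theorem pvFirstGE_congr (p : Nat → Bool) (hi mid : Nat) (hm : mid < hi) (hp : p mid = true) :
    ∀ (k lo : Nat), mid - lo ≤ k → lo ≤ mid → pvFirstGE p lo hi = pvFirstGE p lo mid := by
  intro k
  induction k with
  | zero =>
    intro lo hk hlo
    have : lo = mid := by omega
    subst this
    rw [pvFirstGE, if_pos hm, if_pos hp, pvFirstGE, if_neg (lt_irrefl lo)]
  | succ k ih =>
    intro lo hk hlo
    by_cases heq : lo = mid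
    · subst heq
      rw [pvFirstGE, if_pos hm, if_pos hp, pvFirstGE, if_neg (lt_irrefl lo)]
    · have hlt : lo < mid := by omega
      conv_lhs => rw [pvFirstGE]
      conv_rhs => rw [pvFirstGE]
      rw [if_pos (by omega : lo < hi), if_pos hlt]
      by_cases hp0 : p lo
      · rw [if_pos hp0, if_pos hp0]
      · rw [if_neg hp0, if_neg hp0]
        exact ih (lo + 1) (by omega) (by omega)

theorem pvFirstGE_skip (p : Nat → Bool) (hi mid : Nat) (hm : mid < hi) :
    ∀ (k lo : Nat), mid + 1 - lo ≤ k → lo ≤ mid →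
      (∀ j, lo ≤ j → j ≤ mid → p j = false) →
      pvFirstGE p lo hi = pvFirstGE p (mid + 1) hi := by
  intro k
  induction k with
  | zero => intro lo hk hlo _; omega
  | succ k ih =>
    intro lo hk hlo hall
    rw [pvFirstGE, if_pos (by omega : lo < hi)]
    rw [hall lo le_rfl hlo]
    simp only [Bool.false_eq_true, if_false]
    by_cases heq : lo = mid
    · subst heq; rfl
    · exact ih (lo + 1) (by omega) (by omega) (fun j h1 h2 => hall j (by omega) h2)

theorem pvMono_up (p : Nat → Bool) (n : Nat)
    (hmono : ∀ j, 1 ≤ j → j + 1 ≤ n → p j = true → p (j + 1) = true) :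
    ∀ (a b : Nat), 1 ≤ a → a ≤ b → b ≤ n → p a = true → p b = true := by
  intro a b h1 hab
  induction b, hab using Nat.le_induction with
  | base => intro _ hpa; exact hpa
  | succ b hb ih =>
    intro hbn hpa
    exact hmono b (h1.trans hb) hbn (ih (by omega) hpa)

theorem pvBS_eq_firstGE (p : Nat → Bool) (n : Nat)
    (hmono : ∀ j, 1 ≤ j → j + 1 ≤ n → p j = true → p (j + 1) = true) :
    ∀ (k lo hi : Nat), hi - lo ≤ k → 1 ≤ lo → lo ≤ hi → hi ≤ n →
      pvBS p lo hi = pvFirstGE p lo hi := by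
  intro k
  induction k with
  | zero =>
    intro lo hi hk h1 hlh hhn
    have : lo = hi := by omega
    subst this
    rw [pvBS, if_neg (lt_irrefl lo), pvFirstGE, if_neg (lt_irrefl lo)]
  | succ k ih =>
    intro lo hi hk h1 hlh hhn
    by_cases hlt : lo < hi
    · rw [pvBS, if_pos hlt]
      have hmlo : lo ≤ (lo + hi) / 2 := by omega
      have hmhi : (lo + hi) / 2 < hi := by omega
      by_cases hp : p ((lo + hi) / 2)
      · rw [if_pos hp]
        rw [ih lo ((lo + hi) / 2) (by omega) h1 hmlo (by omega)]
        exact (pvFirstGE_congr p hi ((lo + hi) / 2) hmhi hp ((lo + hi) / 2 - lo) lo le_rfl hmlo).symm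
      · rw [if_neg hp]
        rw [ih ((lo + hi) / 2 + 1) hi (by omega) (by omega) (by omega) hhn]
        refine (pvFirstGE_skip p hi ((lo + hi) / 2) hmhi ((lo + hi) / 2 + 1 - lo) lo le_rfl hmlo ?_).symm
        intro j hj1 hj2
        rw [Bool.eq_false_iff]
        intro hc
        exact hp (pvMono_up p n hmono j ((lo + hi) / 2) (by omega) hj2 (by omega) hc)
    · have : lo = hi := by omega
      subst this
      rw [pvBS, if_neg hlt, pvFirstGE, if_neg hlt]

-- ===== VERDICT (by name: the statement is the Claim_ definition above) =====
theorem naive_k_anonymity_spec : Claim_equal_naive_k_anonymity := by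
  intro ages _ hpre
  unfold Spec_naive_k_anonymity
  cases ages with
  | nil => rfl
  | cons r0 rest =>
    have hne : (r0 :: rest : List (List Int)) ≠ [] := by simp
    have hlen0 : ¬((r0 :: rest : List (List Int)).length = 0) := by simp
    by_cases hn : r0.length = 0
    · have hA : naive_k_anonymity (r0 :: rest) = r0 :: rest := by
        unfold naive_k_anonymity
        rw [if_neg hlen0, List.headD_cons, hn, pvAOuter]
        simp
      have hB : naive_k_anonymity_alt (r0 :: rest) = r0 :: rest := by
        simp only [naive_k_anonymity_alt, List.headD_cons]
        rw [if_neg hlen0, if_pos hn]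
      rw [hA, hB]
    · have hpre' : ∀ r ∈ (r0 :: rest : List (List Int)), r0.length ≤ r.length := by
        intro r hr
        simpa using hpre r hr
      have hmap0 : (r0 :: rest).map (pvBlank r0.length 0) = r0 :: rest := by
        trans ((r0 :: rest).map (fun r => r))
        · exact List.map_congr_left (fun r _ => pvBlank_zero r0.length r)
        · simp
      have hA : naive_k_anonymity (r0 :: rest)
          = (r0 :: rest).map (pvBlank r0.length
              (pvFirstGE (fun m => pvAnon (r0 :: rest) r0.length m) 1 r0.length)) := by
        unfold naive_k_anonymity
        rw [if_neg hlen0, List.headD_cons]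
        conv_lhs => rw [← hmap0]
        exact pvAOuter_spec (r0 :: rest) r0.length hne hpre' r0.length 0 (by omega) (by omega)
      have hB : naive_k_anonymity_alt (r0 :: rest)
          = (r0 :: rest).map (pvBlank r0.length
              (pvBS (fun m => pvAnon (r0 :: rest) r0.length m) 1 r0.length)) := by
        simp only [naive_k_anonymity_alt, List.headD_cons]
        rw [if_neg hlen0, if_neg hn]
        rfl
      have hmono : ∀ j, 1 ≤ j → j + 1 ≤ r0.length →
          pvAnon (r0 :: rest) r0.length j = true →
          pvAnon (r0 :: rest) r0.length (j + 1) = true := by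
        intro j _ hj hp
        exact (pvAnon_iff _ _ _).mpr
          (pvKAnon_mono (r0 :: rest) r0.length j (by omega) hpre' ((pvAnon_iff _ _ _).mp hp))
      rw [hA, hB]
      rw [pvBS_eq_firstGE (fun m => pvAnon (r0 :: rest) r0.length m) r0.length hmono
        r0.length 1 r0.length (by omega) le_rfl (by omega) le_rfl]
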